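-- pv_equiv track=rewrite | github.com/yowatanabe/learn-to-code | python/388/main.py | days_until_higher_latency
-- ===== SOURCE A (Python) =====
-- from typing import List
--
-- def days_until_higher_latency(latencies: List[int]) -> List[int]:
--     """
--     単調スタックを使う典型問題。
--
--     スタックには「まだ次に高い値が見つかっていない日のインデックス」を入れる。
--     現在の値が、スタック上の日の値より大きければ、
--     その日について答えを確定できる。
--
--     計算量: O(n)
--     """
--     n = len(latencies)
--     answer = [0] * n
--     stack = []  # インデックスを保持。対応する値は単調減少になる
--
--     for i, value in enumerate(latencies):
--         while stack and latencies[stack[-1]] < value: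
--             prev = stack.pop()
--             answer[prev] = i - prev
--         stack.append(i)
--
--     return answer
-- ===== SOURCE B (Python) =====
-- from typing import List
--
-- def days_until_higher_latency(latencies: List[int]) -> List[int]:
--     """Right-to-left scan that reuses already-computed distances to jump
--     over days that cannot be the next higher one (no stack)."""
--     n = len(latencies)
--     answer = [0] * n
--     for i in range(n - 1, -1, -1):
--         j = i + 1
--         while j < n:
--             if latencies[j] > latencies[i]:
--                 answer[i] = j - i
--                 break
--             if answer[j] == 0:
--                 break
--             j += answer[j]
--     return answer
-- ===== Notes on version B (the rewrite author's own statement) =====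
-- stated objective: alternative
-- what changed: Replaces the left-to-right monotonic index stack by a right-to-left scan that, for each day, jumps forward over later days using their already-computed next-higher distances (answer[j]==0 meaning no higher day exists) instead of maintaining a stack.
import Mathlib
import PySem

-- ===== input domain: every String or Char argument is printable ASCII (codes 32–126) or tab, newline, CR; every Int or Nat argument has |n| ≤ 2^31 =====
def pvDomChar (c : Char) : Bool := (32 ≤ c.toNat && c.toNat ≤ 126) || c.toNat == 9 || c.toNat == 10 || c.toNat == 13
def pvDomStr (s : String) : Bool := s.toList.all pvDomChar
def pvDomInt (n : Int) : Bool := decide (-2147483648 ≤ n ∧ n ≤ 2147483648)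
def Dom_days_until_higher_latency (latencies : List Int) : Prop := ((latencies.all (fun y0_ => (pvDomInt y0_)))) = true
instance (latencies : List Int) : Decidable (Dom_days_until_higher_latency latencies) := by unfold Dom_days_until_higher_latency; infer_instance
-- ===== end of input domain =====

-- B replaces A's left-to-right monotonic stack by a right-to-left scan that jumps over days
-- using the already-computed distances (objective: alternative algorithm, same O(n)-style cost).

-- ===== PORT A =====
-- A's inner `while stack and latencies[stack[-1]] < value: prev = stack.pop(); answer[prev] = i - prev`.
-- The Python stack is kept head-first here (head = Python's stack[-1]); pop = tail.
def popA (lat : List Int) (i : Int) (value : Int) : List Int → List Int → List Int × List Int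
  | answer, [] => (answer, [])
  | answer, prev :: rest =>
    if PySem.List.pyGetD lat prev 0 < value then
      popA lat i value (PySem.List.pySetD answer prev (i - prev)) rest
    else (answer, prev :: rest)

def days_until_higher_latency (latencies : List Int) : List Int :=
  let n := latencies.length
  ((PySem.List.enumerate latencies 0).foldl
    (fun st p =>
      let r := popA latencies p.1 p.2 st.1 st.2
      (r.1, p.1 :: r.2))
    (List.replicate n 0, [])).1

-- ===== PORT B =====
-- B's inner `while j < n: …` loop; `fuel` only makes it total (it never runs out:
-- j grows by at least 1 per iteration and the loop stops once j reaches n).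
def jumpB (lat : List Int) (answer : List Int) (i : Int) : Int → Nat → Int
  | _, 0 => 0
  | j, fuel+1 =>
    if j < (lat.length : Int) then
      if PySem.List.pyGetD lat i 0 < PySem.List.pyGetD lat j 0 then j - i
      else if PySem.List.pyGetD answer j 0 = 0 then 0
      else jumpB lat answer i (j + PySem.List.pyGetD answer j 0) fuel
    else 0

def days_until_higher_latency_alt (latencies : List Int) : List Int :=
  let n := latencies.length
  (PySem.List.pyRange ((n : Int) - 1) (-1) (-1)).foldl
    (fun answer i => PySem.List.pySetD answer i (jumpB latencies answer i (i + 1) n))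
    (List.replicate n 0)

-- ===== PRECONDITION & SPEC =====
def Spec_days_until_higher_latency (latencies : List Int) (out : List Int) : Prop := out = days_until_higher_latency_alt latencies
instance (latencies : List Int) (out : List Int) : Decidable (Spec_days_until_higher_latency latencies out) := by unfold Spec_days_until_higher_latency; infer_instance

-- ===== CLAIM (what is proved, stated in full; the proofs are below) =====
def Claim_equal_days_until_higher_latency : Prop := ∀ (latencies : List Int), Dom_days_until_higher_latency latencies → Spec_days_until_higher_latency latencies (days_until_higher_latency latencies)

-- ===== LEMMAS AND PROOFS =====

-- `fL lat j` = latencies[j] (all indices we reason about are in range, so default 0 is inert).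
def fL (lat : List Int) (j : Int) : Int := PySem.List.pyGetD lat j 0

-- first index m ≥ j with lat[m] > x, if any (proof-only reference function)
def firstHigher (lat : List Int) (x : Int) (j : Int) : Option Int :=
  if _h : j < (lat.length : Int) then
    if x < fL lat j then some j else firstHigher lat x (j + 1)
  else none
termination_by ((lat.length : Int) - j).toNat
decreasing_by omega

-- the value both programs must put at day i
def specL (lat : List Int) (i : Int) : Int :=
  match firstHigher lat (fL lat i) (i + 1) with
  | some m => m - i
  | none => 0
lemma fh_none_iff (lat : List Int) (x : Int) : ∀ (j : Int),
    (firstHigher lat x j = none ↔ ∀ k, j ≤ k → k < (lat.length : Int) → fL lat k ≤ x) := by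
  intro j
  generalize hd : ((lat.length : Int) - j).toNat = d
  induction d generalizing j with
  | zero =>
      rw [firstHigher]
      simp only [show ¬(j < (lat.length : Int)) by omega, dite_false]
      simp only [true_iff]
      intro k hk hk2; omega
  | succ d ih =>
      rw [firstHigher]
      by_cases h1 : j < (lat.length : Int)
      · simp only [h1, dite_true]
        by_cases h2 : x < fL lat j
        · simp only [h2, if_true]
          constructor
          · intro h; exact absurd h (by simp)
          · intro H; exact absurd (H j (le_refl j) h1) (by omega)
        · simp only [h2, if_false]
          rw [ih (j + 1) (by omega)]
          constructor
          · intro H k hk hk2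
            rcases eq_or_lt_of_le hk with rfl | hlt
            · omega
            · exact H k (by omega) hk2
          · intro H k hk hk2; exact H k (by omega) hk2
      · simp only [h1, dite_false]
        simp only [true_iff]
        intro k hk hk2; omega

lemma fh_some_elim (lat : List Int) (x : Int) : ∀ (j m : Int),
    firstHigher lat x j = some m →
    j ≤ m ∧ m < (lat.length : Int) ∧ x < fL lat m ∧ ∀ k, j ≤ k → k < m → fL lat k ≤ x := by
  intro j
  generalize hd : ((lat.length : Int) - j).toNat = d
  induction d generalizing j with
  | zero =>
      intro m h
      rw [firstHigher] at h
      simp only [show ¬(j < (lat.length : Int)) by omega, dite_false] at h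
      exact absurd h (by simp)
  | succ d ih =>
      intro m h
      rw [firstHigher] at h
      by_cases h1 : j < (lat.length : Int)
      · simp only [h1, dite_true] at h
        by_cases h2 : x < fL lat j
        · simp only [h2, if_true, Option.some.injEq] at h
          subst h
          exact ⟨le_refl j, h1, h2, fun k hk hk2 => absurd hk (by omega)⟩
        · simp only [h2, if_false] at h
          obtain ⟨ha, hb, hc, hdd⟩ := ih (j + 1) (by omega) m h
          refine ⟨by omega, hb, hc, ?_⟩
          intro k hk hk2
          rcases eq_or_lt_of_le hk with rfl | hlt
          · omega
          · exact hdd k (by omega) hk2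
      · simp only [h1, dite_false] at h
        exact absurd h (by simp)

lemma fh_intro (lat : List Int) (x : Int) : ∀ (j m : Int),
    j ≤ m → m < (lat.length : Int) → x < fL lat m → (∀ k, j ≤ k → k < m → fL lat k ≤ x) →
    firstHigher lat x j = some m := by
  intro j
  generalize hd : ((lat.length : Int) - j).toNat = d
  induction d generalizing j with
  | zero => intro m h1 h2 h3 h4; omega
  | succ d ih =>
      intro m h1 h2 h3 h4
      rw [firstHigher]
      simp only [show j < (lat.length : Int) by omega, dite_true]
      rcases eq_or_lt_of_le h1 with rfl | hlt
      · simp [h3]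
      · have : ¬ x < fL lat j := by
          have := h4 j (le_refl j) hlt; omega
        simp only [this, if_false]
        exact ih (j + 1) (by omega) m (by omega) h2 h3 (fun k hk hk2 => h4 k (by omega) hk2)
lemma spec_zero_intro (lat : List Int) (i : Int)
    (H : ∀ k, i < k → k < (lat.length : Int) → fL lat k ≤ fL lat i) : specL lat i = 0 := by
  unfold specL
  rw [(fh_none_iff lat (fL lat i) (i + 1)).mpr (fun k hk hk2 => H k (by omega) hk2)]

lemma spec_first (lat : List Int) (i m : Int) (h1 : i < m) (h2 : m < (lat.length : Int))
    (h3 : fL lat i < fL lat m) (h4 : ∀ k, i < k → k < m → fL lat k ≤ fL lat i) :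
    specL lat i = m - i := by
  unfold specL
  rw [fh_intro lat (fL lat i) (i + 1) m (by omega) h2 h3 (fun k hk hk2 => h4 k (by omega) hk2)]

lemma spec_zero_elim (lat : List Int) (i : Int) (h : specL lat i = 0) :
    ∀ k, i < k → k < (lat.length : Int) → fL lat k ≤ fL lat i := by
  unfold specL at h
  cases heq : firstHigher lat (fL lat i) (i + 1) with
  | none => exact fun k hk hk2 => (fh_none_iff lat (fL lat i) (i + 1)).mp heq k (by omega) hk2
  | some m =>
      rw [heq] at h
      obtain ⟨ha, _, _, _⟩ := fh_some_elim lat (fL lat i) (i + 1) m heq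
      simp at h; omega

lemma spec_ne_zero_elim (lat : List Int) (i : Int) (h : specL lat i ≠ 0) :
    ∃ m, i < m ∧ m < (lat.length : Int) ∧ specL lat i = m - i ∧ fL lat i < fL lat m ∧
      ∀ k, i < k → k < m → fL lat k ≤ fL lat i := by
  unfold specL at h ⊢
  cases heq : firstHigher lat (fL lat i) (i + 1) with
  | none => rw [heq] at h; simp at h
  | some m =>
      obtain ⟨ha, hb, hc, hdd⟩ := fh_some_elim lat (fL lat i) (i + 1) m heq
      exact ⟨m, by omega, hb, rfl, hc, fun k hk hk2 => hdd k (by omega) hk2⟩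
lemma pyGetD_out (xs : List Int) (m d : Int) (h : 0 ≤ m) (h2 : (xs.length : Int) ≤ m) :
    PySem.List.pyGetD xs m d = d := by
  simp [PySem.List.pyGetD, PySem.List.pyGet?, PySem.List.pyIdx?,
    show ¬ m < (xs.length : Int) by omega, h]

lemma pyGetD_pySetD_int (xs : List Int) (i m v d : Int) (hi0 : 0 ≤ i)
    (hil : i < (xs.length : Int)) (hm : 0 ≤ m) :
    PySem.List.pyGetD (PySem.List.pySetD xs i v) m d = if m = i then v else PySem.List.pyGetD xs m d := by
  rw [PySem.List.pySetD_of_nonneg xs v hi0]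
  by_cases hml : m < (xs.length : Int)
  · rw [PySem.List.pyGetD_eq_getElem _ d hm (by simpa using hml), List.getElem_set]
    by_cases hmi : m = i
    · subst hmi
      rw [if_pos (by omega), if_pos rfl]
    · rw [if_neg (by omega), if_neg hmi, PySem.List.pyGetD_eq_getElem xs d hm hml]
  · rw [pyGetD_out _ _ _ hm (by simpa using hml), pyGetD_out xs m d hm (by omega),
      if_neg (by omega)]

lemma pyGetD_replicate_zero (n : Nat) (j : Int) (h : 0 ≤ j) :
    PySem.List.pyGetD (List.replicate n (0 : Int)) j 0 = 0 := by
  by_cases hj : j < ((List.replicate n (0 : Int)).length : Int)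
  · rw [PySem.List.pyGetD_eq_getElem _ _ h hj, List.getElem_replicate]
  · exact pyGetD_out _ _ _ h (by omega)

lemma jumpB_spec (lat ans : List Int) (i : Int) (_hi0 : 0 ≤ i) (_hin : i < (lat.length : Int)) :
    ∀ (fuel : Nat) (j : Int), i < j →
    (∀ k, i < k → k < j → fL lat k ≤ fL lat i) →
    (∀ j', i < j' → j' < (lat.length : Int) → PySem.List.pyGetD ans j' 0 = specL lat j') →
    (lat.length : Int) ≤ j + fuel →
    jumpB lat ans i j fuel = specL lat i := by
  intro fuel
  induction fuel with
  | zero =>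
      intro j hij hbelow hans hfuel
      rw [jumpB]
      exact (spec_zero_intro lat i (fun k hk hk2 => hbelow k hk (by omega))).symm
  | succ fuel ih =>
      intro j hij hbelow hans hfuel
      rw [jumpB]
      by_cases hj : j < (lat.length : Int)
      · rw [if_pos hj]
        by_cases hgt : fL lat i < fL lat j
        · rw [if_pos (show PySem.List.pyGetD lat i 0 < PySem.List.pyGetD lat j 0 from hgt)]
          exact (spec_first lat i j hij hj hgt hbelow).symm
        · rw [if_neg (show ¬ PySem.List.pyGetD lat i 0 < PySem.List.pyGetD lat j 0 from hgt)]
          have hansj : PySem.List.pyGetD ans j 0 = specL lat j := hans j hij hj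
          by_cases hz : PySem.List.pyGetD ans j 0 = 0
          · rw [if_pos hz]
            refine (spec_zero_intro lat i (fun k hk hk2 => ?_)).symm
            rcases lt_trichotomy k j with hlt | rfl | hgt2
            · exact hbelow k hk hlt
            · omega
            · have h1 : fL lat k ≤ fL lat j := spec_zero_elim lat j (hansj ▸ hz) k hgt2 hk2
              omega
          · rw [if_neg hz]
            obtain ⟨m, hjm, hmn, hspec, hfm, hmid⟩ := spec_ne_zero_elim lat j (hansj ▸ hz)
            have hjump : j + PySem.List.pyGetD ans j 0 = m := by rw [hansj, hspec]; ring
            rw [hjump]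
            refine ih m (by omega) ?_ hans (by omega)
            intro k hk hk2
            rcases lt_trichotomy k j with hlt | rfl | hgt2
            · exact hbelow k hk hlt
            · omega
            · have h1 : fL lat k ≤ fL lat j := hmid k hgt2 hk2
              omega
      · rw [if_neg hj]
        exact (spec_zero_intro lat i (fun k hk hk2 => hbelow k hk (by omega))).symm

lemma loopB (lat : List Int) : ∀ (k : Nat) (ans : List Int), (k : Int) ≤ (lat.length : Int) →
    ans.length = lat.length →
    (∀ j : Int, 0 ≤ j → PySem.List.pyGetD ans j 0 =
      if (k : Int) ≤ j ∧ j < (lat.length : Int) then specL lat j else 0) →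
    ((PySem.List.pyRange ((k : Int) - 1) (-1) (-1)).foldl
        (fun answer i => PySem.List.pySetD answer i (jumpB lat answer i (i + 1) lat.length)) ans).length
      = lat.length ∧
    ∀ j : Int, 0 ≤ j → j < (lat.length : Int) →
      PySem.List.pyGetD ((PySem.List.pyRange ((k : Int) - 1) (-1) (-1)).foldl
        (fun answer i => PySem.List.pySetD answer i (jumpB lat answer i (i + 1) lat.length)) ans) j 0
        = specL lat j := by
  intro k
  induction k with
  | zero =>
      intro ans hk hlen hinv
      rw [show ((0 : Nat) : Int) - 1 = -1 by norm_num, PySem.List.pyRange_neg_one_eq_nil (by omega)]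
      simp only [List.foldl_nil]
      refine ⟨hlen, fun j hj0 hjn => ?_⟩
      rw [hinv j hj0, if_pos ⟨by exact_mod_cast hj0, hjn⟩]
  | succ k ih =>
      intro ans hk hlen hinv
      rw [show ((k + 1 : Nat) : Int) - 1 = (k : Int) by push_cast; ring,
          PySem.List.pyRange_neg_one_cons (by omega), List.foldl_cons]
      have hv : jumpB lat ans (k : Int) ((k : Int) + 1) lat.length = specL lat (k : Int) := by
        refine jumpB_spec lat ans (k : Int) (by omega) (by push_cast at hk; omega) lat.length ((k : Int) + 1)
          (by omega) (fun k' h1 h2 => by omega) (fun j' h1 h2 => ?_) (by omega)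
        rw [hinv j' (by omega), if_pos ⟨by push_cast; omega, h2⟩]
      have hnext : ∀ j : Int, 0 ≤ j →
          PySem.List.pyGetD (PySem.List.pySetD ans (k : Int) (jumpB lat ans (k : Int) ((k : Int) + 1) lat.length)) j 0 =
          if (k : Int) ≤ j ∧ j < (lat.length : Int) then specL lat j else 0 := by
        intro j hj0
        rw [pyGetD_pySetD_int ans (k : Int) j _ 0 (by omega) (by push_cast at hk ⊢; omega) hj0]
        by_cases hjk : j = (k : Int)
        · subst hjk
          rw [if_pos rfl, hv, if_pos ⟨le_refl _, by push_cast at hk ⊢; omega⟩]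
        · rw [if_neg hjk, hinv j hj0]
          by_cases hcond : ((k + 1 : Nat) : Int) ≤ j ∧ j < (lat.length : Int)
          · rw [if_pos hcond, if_pos (by push_cast at hcond ⊢; omega)]
          · rw [if_neg hcond, if_neg (by push_cast at hcond ⊢; omega)]
      have hres := ih (PySem.List.pySetD ans (k : Int) (jumpB lat ans (k : Int) ((k : Int) + 1) lat.length))
        (by omega) (by rw [PySem.List.length_pySetD]; exact hlen) hnext
      exact hres

lemma altB_spec (lat : List Int) :
    (days_until_higher_latency_alt lat).length = lat.length ∧
    ∀ j : Int, 0 ≤ j → j < (lat.length : Int) →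
      PySem.List.pyGetD (days_until_higher_latency_alt lat) j 0 = specL lat j := by
  have := loopB lat lat.length (List.replicate lat.length 0) (le_refl _)
    (by simp)
    (fun j hj0 => by
      rw [pyGetD_replicate_zero _ _ hj0, if_neg (by omega)])
  exact this
def stepA (lat : List Int) (st : List Int × List Int) (j : Int) : List Int × List Int :=
  let r := popA lat j (PySem.List.pyGetD lat j 0) st.1 st.2
  (r.1, j :: r.2)

lemma portA_eq (lat : List Int) :
    days_until_higher_latency lat =
      ((PySem.List.pyRange 0 (lat.length : Int) 1).foldl (stepA lat)
        (List.replicate lat.length 0, [])).1 := by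
  unfold days_until_higher_latency
  simp only [PySem.List.enumerate_eq_map_pyRange lat (0 : Int), List.foldl_map, PySem.List.len_eq]
  rfl

lemma popA_spec (lat : List Int) (i : Int) (_hi0 : 0 ≤ i) (hin : i < (lat.length : Int)) :
    ∀ (st ans : List Int),
    ans.length = lat.length →
    (∀ j ∈ st, 0 ≤ j ∧ j < i) →
    st.Pairwise (· > ·) →
    st.Pairwise (fun a b => fL lat a ≤ fL lat b) →
    (∀ j ∈ st, ∀ k, j < k → k < i → fL lat k ≤ fL lat j) →
    (∀ j : Int, 0 ≤ j → PySem.List.pyGetD ans j 0 = if j < i ∧ j ∉ st then specL lat j else 0) →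
    (popA lat i (fL lat i) ans st).1.length = lat.length ∧
    (∀ j ∈ (popA lat i (fL lat i) ans st).2, 0 ≤ j ∧ j < i) ∧
    (popA lat i (fL lat i) ans st).2.Pairwise (· > ·) ∧
    (popA lat i (fL lat i) ans st).2.Pairwise (fun a b => fL lat a ≤ fL lat b) ∧
    (∀ j ∈ (popA lat i (fL lat i) ans st).2, ∀ k, j < k → k < i → fL lat k ≤ fL lat j) ∧
    (∀ j ∈ (popA lat i (fL lat i) ans st).2, fL lat i ≤ fL lat j) ∧
    (∀ j : Int, 0 ≤ j → PySem.List.pyGetD (popA lat i (fL lat i) ans st).1 j 0 =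
      if j < i ∧ j ∉ (popA lat i (fL lat i) ans st).2 then specL lat j else 0) := by
  intro st
  induction st with
  | nil =>
      intro ans hlen hmem hpw hple hhist hans
      rw [popA]
      exact ⟨hlen, by simp, by simp, by simp, by simp, by simp, fun j hj0 => hans j hj0⟩
  | cons prev rest ih =>
      intro ans hlen hmem hpw hple hhist hans
      rw [popA]
      by_cases hlt : fL lat prev < fL lat i
      · rw [if_pos (show PySem.List.pyGetD lat prev 0 < fL lat i from hlt)]
        have hprev := hmem prev (List.mem_cons_self)
        have hprevnotin : prev ∉ rest := by
          intro hmemr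
          have := (List.pairwise_cons.mp hpw).1 prev hmemr
          omega
        have hsp : specL lat prev = i - prev :=
          spec_first lat prev i (by omega) hin hlt
            (fun k hk hk2 => hhist prev (List.mem_cons_self) k hk hk2)
        refine ih (PySem.List.pySetD ans prev (i - prev))
          (by rw [PySem.List.length_pySetD]; exact hlen)
          (fun j hj => hmem j (List.mem_cons_of_mem _ hj))
          (List.pairwise_cons.mp hpw).2
          (List.pairwise_cons.mp hple).2
          (fun j hj => hhist j (List.mem_cons_of_mem _ hj))
          ?_
        intro j hj0
        rw [pyGetD_pySetD_int ans prev j _ 0 (by omega) (by omega) hj0]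
        by_cases hjp : j = prev
        · subst hjp
          rw [if_pos rfl, if_pos ⟨by omega, hprevnotin⟩, hsp]
        · rw [if_neg hjp, hans j hj0]
          by_cases hcond : j < i ∧ j ∉ prev :: rest
          · rw [if_pos hcond, if_pos ⟨hcond.1, fun hr => hcond.2 (List.mem_cons_of_mem _ hr)⟩]
          · rw [if_neg hcond, if_neg (by
              intro ⟨h1, h2⟩
              exact hcond ⟨h1, by simp [hjp, h2]⟩)]
      · rw [if_neg (show ¬ PySem.List.pyGetD lat prev 0 < fL lat i from hlt)]
        refine ⟨hlen, hmem, hpw, hple, hhist, ?_, hans⟩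
        intro j hj
        rcases List.mem_cons.mp hj with rfl | hjr
        · omega
        · have h1 := (List.pairwise_cons.mp hple).1 j hjr
          omega

lemma stepA_spec (lat : List Int) (i : Int) (hi0 : 0 ≤ i) (hin : i < (lat.length : Int))
    (ans st : List Int)
    (hlen : ans.length = lat.length)
    (hmem : ∀ j ∈ st, 0 ≤ j ∧ j < i)
    (hpw : st.Pairwise (· > ·))
    (hple : st.Pairwise (fun a b => fL lat a ≤ fL lat b))
    (hhist : ∀ j ∈ st, ∀ k, j < k → k < i → fL lat k ≤ fL lat j)
    (hans : ∀ j : Int, 0 ≤ j → PySem.List.pyGetD ans j 0 = if j < i ∧ j ∉ st then specL lat j else 0) :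
    (stepA lat (ans, st) i).1.length = lat.length ∧
    (∀ j ∈ (stepA lat (ans, st) i).2, 0 ≤ j ∧ j < i + 1) ∧
    (stepA lat (ans, st) i).2.Pairwise (· > ·) ∧
    (stepA lat (ans, st) i).2.Pairwise (fun a b => fL lat a ≤ fL lat b) ∧
    (∀ j ∈ (stepA lat (ans, st) i).2, ∀ k, j < k → k < i + 1 → fL lat k ≤ fL lat j) ∧
    (∀ j : Int, 0 ≤ j → PySem.List.pyGetD (stepA lat (ans, st) i).1 j 0 =
      if j < i + 1 ∧ j ∉ (stepA lat (ans, st) i).2 then specL lat j else 0) := by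
  obtain ⟨plen, pmem, ppw, pple, phist, ptop, pans⟩ :=
    popA_spec lat i hi0 hin st ans hlen hmem hpw hple hhist hans
  have hstep1 : (stepA lat (ans, st) i).1 = (popA lat i (fL lat i) ans st).1 := rfl
  have hstep2 : (stepA lat (ans, st) i).2 = i :: (popA lat i (fL lat i) ans st).2 := rfl
  rw [hstep1, hstep2]
  refine ⟨plen, ?_, ?_, ?_, ?_, ?_⟩
  · intro j hj
    rcases List.mem_cons.mp hj with rfl | hjr
    · omega
    · have := pmem j hjr; omega
  · exact List.pairwise_cons.mpr ⟨fun j hj => by have := pmem j hj; omega, ppw⟩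
  · exact List.pairwise_cons.mpr ⟨fun j hj => ptop j hj, pple⟩
  · intro j hj k hk hk2
    rcases List.mem_cons.mp hj with rfl | hjr
    · omega
    · rcases lt_or_ge k i with hki | hki
      · exact phist j hjr k hk hki
      · have : k = i := by omega
        subst this
        exact ptop j hjr
  · intro j hj0
    rw [pans j hj0]
    by_cases hji : j = i
    · subst hji
      rw [if_neg (by omega), if_neg (by simp)]
    · by_cases hcond : j < i ∧ j ∉ (popA lat i (fL lat i) ans st).2
      · rw [if_pos hcond, if_pos ⟨by omega, by
          intro hmem'
          rcases List.mem_cons.mp hmem' with rfl | hr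
          · exact hji rfl
          · exact hcond.2 hr⟩]
      · rw [if_neg hcond, if_neg (by
          intro ⟨h1, h2⟩
          exact hcond ⟨by omega, fun hr => h2 (List.mem_cons_of_mem _ hr)⟩)]

lemma foldA_inv (lat : List Int) : ∀ (m : Nat), (m : Int) ≤ (lat.length : Int) →
    ((PySem.List.pyRange 0 (m : Int) 1).foldl (stepA lat)
        (List.replicate lat.length 0, [])).1.length = lat.length ∧
    (∀ j ∈ ((PySem.List.pyRange 0 (m : Int) 1).foldl (stepA lat)
        (List.replicate lat.length 0, [])).2, 0 ≤ j ∧ j < (m : Int)) ∧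
    ((PySem.List.pyRange 0 (m : Int) 1).foldl (stepA lat)
        (List.replicate lat.length 0, [])).2.Pairwise (· > ·) ∧
    ((PySem.List.pyRange 0 (m : Int) 1).foldl (stepA lat)
        (List.replicate lat.length 0, [])).2.Pairwise (fun a b => fL lat a ≤ fL lat b) ∧
    (∀ j ∈ ((PySem.List.pyRange 0 (m : Int) 1).foldl (stepA lat)
        (List.replicate lat.length 0, [])).2, ∀ k, j < k → k < (m : Int) → fL lat k ≤ fL lat j) ∧
    (∀ j : Int, 0 ≤ j → PySem.List.pyGetD ((PySem.List.pyRange 0 (m : Int) 1).foldl (stepA lat)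
        (List.replicate lat.length 0, [])).1 j 0 =
      if j < (m : Int) ∧ j ∉ ((PySem.List.pyRange 0 (m : Int) 1).foldl (stepA lat)
        (List.replicate lat.length 0, [])).2 then specL lat j else 0) := by
  intro m
  induction m with
  | zero =>
      intro hm
      rw [show ((0 : Nat) : Int) = 0 by norm_num, PySem.List.pyRange_one_eq_nil (by omega)]
      simp only [List.foldl_nil]
      refine ⟨by simp, by simp, by simp, by simp, by simp, ?_⟩
      intro j hj0
      rw [pyGetD_replicate_zero _ _ hj0, if_neg (by omega)]
  | succ m ih =>
      intro hm
      rw [show ((m + 1 : Nat) : Int) = (m : Int) + 1 by push_cast; ring,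
        PySem.List.pyRange_one_succ_right (by omega), List.foldl_append, List.foldl_cons,
        List.foldl_nil]
      obtain ⟨hlen, hmem, hpw, hple, hhist, hans⟩ := ih (by omega)
      obtain hgoal := stepA_spec lat (m : Int) (by omega) (by omega) _ _ hlen hmem hpw hple hhist hans
      exact hgoal

-- ===== VERDICT (by name: the statement is the Claim_ definition above) =====
theorem days_until_higher_latency_spec : Claim_equal_days_until_higher_latency := by
  unfold Claim_equal_days_until_higher_latency
  intro lat _dom
  unfold Spec_days_until_higher_latency
  obtain ⟨hlenB, hB⟩ := altB_spec lat
  rw [portA_eq lat]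
  obtain ⟨hlenA, _hmem, _hpw, _hple, hhist, hans⟩ := foldA_inv lat lat.length (le_refl _)
  have hA : ∀ j : Int, 0 ≤ j → j < (lat.length : Int) →
      PySem.List.pyGetD ((PySem.List.pyRange 0 ((lat.length : Nat) : Int) 1).foldl (stepA lat)
        (List.replicate lat.length 0, [])).1 j 0 = specL lat j := by
    intro j hj0 hjn
    rw [hans j hj0]
    by_cases hin : j ∈ ((PySem.List.pyRange 0 ((lat.length : Nat) : Int) 1).foldl (stepA lat)
        (List.replicate lat.length 0, [])).2
    · rw [if_neg (fun hc => hc.2 hin)]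
      exact (spec_zero_intro lat j (fun k hk hk2 => hhist j hin k hk hk2)).symm
    · rw [if_pos ⟨hjn, hin⟩]
  apply List.ext_getElem (by rw [hlenA, hlenB])
  intro m h1 h2
  have e1 := PySem.List.pyGetD_eq_getElem ((PySem.List.pyRange 0 ((lat.length : Nat) : Int) 1).foldl
      (stepA lat) (List.replicate lat.length 0, [])).1 (0 : Int)
      (show (0 : Int) ≤ (m : Int) by omega) (by exact_mod_cast h1)
  have e2 := PySem.List.pyGetD_eq_getElem (days_until_higher_latency_alt lat) (0 : Int)
      (show (0 : Int) ≤ (m : Int) by omega) (by exact_mod_cast h2)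
  simp only [Int.toNat_natCast] at e1 e2
  rw [← e1, ← e2, hA (m : Int) (by omega) (by rw [hlenA] at h1; exact_mod_cast h1),
    hB (m : Int) (by omega) (by rw [hlenB] at h2; exact_mod_cast h2)]
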